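-- pv_equiv track=rewrite | github.com/MountainUnicorn/add | scripts/generate-agents-md.py | _prd_paragraphs
-- ===== SOURCE A (Python) =====
-- def _prd_paragraphs(text: str) -> list[str]:
--     """Return paragraphs after the first H1 (or from top if no H1)."""
--     lines = text.splitlines()
--     start = 0
--     for i, line in enumerate(lines):
--         if line.startswith("# "):
--             start = i + 1
--             break
--     paragraphs: list[list[str]] = []
--     current: list[str] = []
--     for line in lines[start:]:
--         stripped = line.strip()
--         if not stripped:
--             if current:
--                 paragraphs.append(current)
--                 current = []
--             continue
--         if stripped.startswith("## ") or stripped == "---":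
--             if current:
--                 paragraphs.append(current)
--                 current = []
--             continue
--         current.append(stripped)
--     if current:
--         paragraphs.append(current)
--     return [" ".join(p) for p in paragraphs]
-- ===== SOURCE B (Python) =====
-- def _is_break(s: str) -> bool:
--     return not s or s.startswith("## ") or s == "---"
--
--
-- def _prd_paragraphs(text: str) -> list[str]:
--     """Return paragraphs after the first H1 (or from top if no H1)."""
--     lines = text.splitlines()
--     start = 0
--     for i, line in enumerate(lines):
--         if line.startswith("# "):
--             start = i + 1
--             break
--     stripped = [line.strip() for line in lines[start:]]
--     paragraphs = []
--     i = 0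
--     while i < len(stripped):
--         if _is_break(stripped[i]):
--             i += 1
--         else:
--             j = i
--             while j < len(stripped) and not _is_break(stripped[j]):
--                 j += 1
--             paragraphs.append(" ".join(stripped[i:j]))
--             i = j
--     return paragraphs
-- ===== Notes on version B (the rewrite author's own statement) =====
-- stated objective: alternative
-- what changed: B pre-strips the lines once and scans them with two index pointers, emitting each maximal run of content lines as one joined paragraph, instead of A's accumulator of word lists flushed at every break and joined in a final map.
import Mathlib
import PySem

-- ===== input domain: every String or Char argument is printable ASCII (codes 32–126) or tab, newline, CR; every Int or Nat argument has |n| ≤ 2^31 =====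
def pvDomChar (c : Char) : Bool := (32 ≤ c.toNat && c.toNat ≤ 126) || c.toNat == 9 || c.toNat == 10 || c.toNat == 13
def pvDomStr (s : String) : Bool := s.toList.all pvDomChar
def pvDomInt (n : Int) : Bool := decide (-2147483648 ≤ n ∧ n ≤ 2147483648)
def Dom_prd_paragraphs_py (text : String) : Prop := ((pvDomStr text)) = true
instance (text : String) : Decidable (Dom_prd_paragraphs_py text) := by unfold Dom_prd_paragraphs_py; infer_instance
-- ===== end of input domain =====

-- B pre-strips the lines once and scans them with two index pointers, emitting each
-- maximal run of content lines as one joined paragraph, instead of A's accumulator of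
-- word lists flushed at every break and joined in a final map (objective: alternative).

-- ===== PORT A =====
-- Both Pythons find `start` with the identical loop
-- `for i, line in enumerate(lines): if line.startswith("# "): start = i + 1; break`,
-- so both ports share this helper.
def pvFindH1Start (i : Nat) (ls : List String) : Nat :=
  match ls with
  | [] => 0
  | l :: rest => if PySem.Str.startswith l "# " then i + 1 else pvFindH1Start (i + 1) rest

-- the body of A's second loop: state = (paragraphs, current)
def pvAStep (acc : List (List String) × List String) (line : String) :
    List (List String) × List String :=
  let stripped := PySem.Str.strip line
  if stripped = "" then
    if acc.2 ≠ [] then (acc.1 ++ [acc.2], []) else acc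
  else if PySem.Str.startswith stripped "## " = true ∨ stripped = "---" then
    if acc.2 ≠ [] then (acc.1 ++ [acc.2], []) else acc
  else (acc.1, acc.2 ++ [stripped])

def prd_paragraphs_py (text : String) : List String :=
  let lines := PySem.Str.splitlines text
  let start := pvFindH1Start 0 lines
  let st := (lines.drop start).foldl pvAStep ([], [])
  let paragraphs := if st.2 ≠ [] then st.1 ++ [st.2] else st.1
  paragraphs.map (fun p => PySem.Str.join " " p)

-- ===== PORT B =====
-- Python's `_is_break` helper
def pvIsBreak (s : String) : Bool :=
  decide (s = "") || PySem.Str.startswith s "## " || decide (s = "---")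

-- B's inner while loop `j = i; while j < len(ss) and not _is_break(ss[j]): j += 1`;
-- the index is known in range, so `ss[j]` is ported as `ss.getD j ""`.
def pvAdv (ss : List String) (j : Nat) : Nat :=
  if j < ss.length ∧ pvIsBreak (ss.getD j "") = false then pvAdv ss (j + 1) else j
termination_by ss.length - j
decreasing_by omega

theorem pvAdv_ge (ss : List String) (j : Nat) : j ≤ pvAdv ss j := by
  unfold pvAdv
  split
  · have := pvAdv_ge ss (j + 1); omega
  · exact le_refl j
termination_by ss.length - j
decreasing_by rename_i h; omega

-- B's outer while loop; state = (paragraphs = acc, i); `ss[i:j]` = (ss.drop i).take (j - i)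
def pvScanIdx (ss : List String) (acc : List String) (i : Nat) : List String :=
  if h : i < ss.length then
    if hb : pvIsBreak (ss.getD i "") then pvScanIdx ss acc (i + 1)
    else
      pvScanIdx ss (acc ++ [PySem.Str.join " " ((ss.drop i).take (pvAdv ss i - i))]) (pvAdv ss i)
  else acc
termination_by ss.length - i
decreasing_by
  · omega
  · have h1 : pvAdv ss i = pvAdv ss (i + 1) := by
      rw [pvAdv]; rw [if_pos ⟨h, by simpa using hb⟩]
    have := pvAdv_ge ss (i + 1); omega

def prd_paragraphs_py_alt (text : String) : List String :=
  let lines := PySem.Str.splitlines text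
  let start := pvFindH1Start 0 lines
  let stripped := (lines.drop start).map PySem.Str.strip
  pvScanIdx stripped [] 0

-- ===== PRECONDITION & SPEC =====
def Spec_prd_paragraphs_py (text : String) (out : List String) : Prop := out = prd_paragraphs_py_alt text
instance (text : String) (out : List String) : Decidable (Spec_prd_paragraphs_py text out) := by unfold Spec_prd_paragraphs_py; infer_instance

-- ===== CLAIM (what is proved, stated in full; the proofs are below) =====
def Claim_equal_prd_paragraphs_py : Prop := ∀ (text : String), Dom_prd_paragraphs_py text → Spec_prd_paragraphs_py text (prd_paragraphs_py text)

-- ===== LEMMAS AND PROOFS =====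

def pvContent (s : String) : Bool := !pvIsBreak s

-- structural version of B's scan, on the list suffix
def pvScanL : List String → List String
  | [] => []
  | s :: rest =>
    if pvIsBreak s then pvScanL rest
    else PySem.Str.join " " (List.takeWhile pvContent (s :: rest)) ::
         pvScanL (List.dropWhile pvContent (s :: rest))
termination_by ls => ls.length
decreasing_by
  · simp
  · rename_i hb
    have h1 : List.dropWhile pvContent (s :: rest) = List.dropWhile pvContent rest := by
      simp [List.dropWhile, pvContent, hb]
    rw [h1]
    have := List.length_dropWhile_le pvContent rest
    simp; omega

theorem pvAdv_take (ss : List String) (j : Nat) :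
    (ss.drop j).take (pvAdv ss j - j) = (ss.drop j).takeWhile pvContent ∧
    ss.drop (pvAdv ss j) = (ss.drop j).dropWhile pvContent := by
  rw [pvAdv]
  by_cases h : j < ss.length ∧ pvIsBreak (ss.getD j "") = false
  · rw [if_pos h]
    obtain ⟨hlt, hbk⟩ := h
    have hd : ss.drop j = ss[j] :: ss.drop (j + 1) := List.drop_eq_getElem_cons hlt
    have hg : ss.getD j "" = ss[j] := by simp [List.getD, hlt]
    have ih := pvAdv_take ss (j + 1)
    have hge := pvAdv_ge ss (j + 1)
    constructor
    · rw [hd, List.takeWhile_cons]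
      have hct : pvContent ss[j] = true := by simp [pvContent, hg ▸ hbk]
      have harith : pvAdv ss (j + 1) - j = (pvAdv ss (j + 1) - (j + 1)) + 1 := by omega
      rw [hct, harith, List.take_succ_cons, ih.1]
      simp
    · rw [hd, List.dropWhile_cons]
      have hct : pvContent ss[j] = true := by simp [pvContent, hg ▸ hbk]
      rw [hct, ih.2]
      simp
  · rw [if_neg h]
    constructor
    · simp only [Nat.sub_self, List.take_zero]
      by_cases hlt : j < ss.length
      · have hbk : pvIsBreak (ss.getD j "") = true := by
          by_contra hc
          exact h ⟨hlt, by simpa using hc⟩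
        have hd : ss.drop j = ss[j] :: ss.drop (j + 1) := List.drop_eq_getElem_cons hlt
        have hg : ss.getD j "" = ss[j] := by simp [List.getD, hlt]
        have hcf : pvContent ss[j] = false := by simp [pvContent, hg ▸ hbk]
        rw [hd, List.takeWhile_cons, hcf]
        simp
      · rw [List.drop_eq_nil_of_le (by omega)]; simp
    · by_cases hlt : j < ss.length
      · have hbk : pvIsBreak (ss.getD j "") = true := by
          by_contra hc
          exact h ⟨hlt, by simpa using hc⟩
        have hd : ss.drop j = ss[j] :: ss.drop (j + 1) := List.drop_eq_getElem_cons hlt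
        have hg : ss.getD j "" = ss[j] := by simp [List.getD, hlt]
        have hcf : pvContent ss[j] = false := by simp [pvContent, hg ▸ hbk]
        rw [hd, List.dropWhile_cons, hcf]
        simp
      · rw [List.drop_eq_nil_of_le (le_of_not_gt hlt)]
        simp
termination_by ss.length - j
decreasing_by omega

theorem pvScanIdx_eq (ss : List String) (acc : List String) (i : Nat) :
    pvScanIdx ss acc i = acc ++ pvScanL (ss.drop i) := by
  rw [pvScanIdx]
  by_cases h : i < ss.length
  · rw [dif_pos h]
    have hd : ss.drop i = ss[i] :: ss.drop (i + 1) := List.drop_eq_getElem_cons h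
    have hg : ss.getD i "" = ss[i] := by simp [List.getD, h]
    by_cases hb : pvIsBreak (ss.getD i "") = true
    · rw [dif_pos hb, pvScanIdx_eq]
      rw [hd, pvScanL, if_pos (hg ▸ hb)]
    · rw [dif_neg hb, pvScanIdx_eq]
      have hgt : i < pvAdv ss i := by
        have h1 : pvAdv ss i = pvAdv ss (i + 1) := by
          rw [pvAdv]; rw [if_pos ⟨h, by simpa using hb⟩]
        have := pvAdv_ge ss (i + 1); omega
      rw [hd, pvScanL, if_neg (by simp [hg ▸ hb])]
      rw [List.append_assoc, List.singleton_append, ← hd,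
        (pvAdv_take ss i).1, (pvAdv_take ss i).2]
  · rw [dif_neg h, List.drop_eq_nil_of_le (by omega), pvScanL, List.append_nil]
termination_by ss.length - i
decreasing_by
  · omega
  · have h1 : pvAdv ss i = pvAdv ss (i + 1) := by
      rw [pvAdv]; rw [if_pos ⟨h, by simpa using hb⟩]
    have := pvAdv_ge ss (i + 1); omega

-- how a pending (not yet flushed) word list of A combines with pvScanL on the rest
def pvTail (cur : List String) (ms : List String) : List String :=
  if cur = [] then pvScanL ms
  else PySem.Str.join " " (cur ++ ms.takeWhile pvContent) ::
       pvScanL (ms.dropWhile pvContent)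

theorem pvBreak_iff (s : String) :
    pvIsBreak s = true ↔ (s = "" ∨ PySem.Str.startswith s "## " = true ∨ s = "---") := by
  simp [pvIsBreak, or_assoc]

theorem pvScanL_break (s : String) (rest : List String) (hb : pvIsBreak s = true) :
    pvScanL (s :: rest) = pvScanL rest := by
  rw [pvScanL, if_pos hb]

theorem pvScanL_content (s : String) (rest : List String) (hb : pvIsBreak s = false) :
    pvScanL (s :: rest) = PySem.Str.join " " (s :: rest.takeWhile pvContent) ::
      pvScanL (rest.dropWhile pvContent) := by
  rw [pvScanL, if_neg (by simp [hb])]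
  have hc : pvContent s = true := by simp [pvContent, hb]
  simp [hc]

theorem pvMain (ls : List String) : ∀ (ps : List (List String)) (cur : List String),
    (if (ls.foldl pvAStep (ps, cur)).2 ≠ [] then
        (ls.foldl pvAStep (ps, cur)).1 ++ [(ls.foldl pvAStep (ps, cur)).2]
      else (ls.foldl pvAStep (ps, cur)).1).map (fun p => PySem.Str.join " " p)
    = ps.map (fun p => PySem.Str.join " " p) ++ pvTail cur (ls.map PySem.Str.strip) := by
  induction ls with
  | nil =>
    intro ps cur
    cases cur with
    | nil => simp [pvTail, pvScanL]
    | cons c cs => simp [pvTail, pvScanL]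
  | cons l ls ih =>
    intro ps cur
    by_cases hb : pvIsBreak (PySem.Str.strip l) = true
    · have ha : pvAStep (ps, cur) l = ((if cur = [] then ps else ps ++ [cur]), []) := by
        rw [pvBreak_iff] at hb
        simp only [pvAStep]
        by_cases h0 : PySem.Str.strip l = ""
        · rw [if_pos h0]; cases cur <;> simp
        · rw [if_neg h0, if_pos (hb.resolve_left h0)]; cases cur <;> simp
      rw [List.foldl_cons, ha, ih]
      have hcf : pvContent (PySem.Str.strip l) = false := by simp [pvContent, hb]
      cases cur with
      | nil => simp [pvTail, List.map_cons, pvScanL_break _ _ hb]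
      | cons c cs =>
        simp [pvTail, List.map_cons, hcf, pvScanL_break _ _ hb]
    · have ha : pvAStep (ps, cur) l = (ps, cur ++ [PySem.Str.strip l]) := by
        rw [pvBreak_iff] at hb
        rw [not_or, not_or] at hb
        obtain ⟨h0, h1, h2⟩ := hb
        simp only [pvAStep]
        rw [if_neg h0, if_neg (fun h => h.elim (fun hh => h1 hh) h2)]
      rw [List.foldl_cons, ha, ih]
      have hc : pvContent (PySem.Str.strip l) = true := by simp [pvContent, hb]
      have hbf : pvIsBreak (PySem.Str.strip l) = false := by simpa using hb
      cases cur with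
      | nil =>
        simp [pvTail, List.map_cons, pvScanL_content _ _ hbf]
      | cons c cs =>
        simp [pvTail, List.map_cons, hc, List.append_assoc]

-- ===== VERDICT (by name: the statement is the Claim_ definition above) =====
theorem prd_paragraphs_py_spec : Claim_equal_prd_paragraphs_py := by
  intro text _
  unfold Spec_prd_paragraphs_py prd_paragraphs_py prd_paragraphs_py_alt
  rw [pvScanIdx_eq, List.drop_zero, List.nil_append]
  have h := pvMain ((PySem.Str.splitlines text).drop
      (pvFindH1Start 0 (PySem.Str.splitlines text))) [] []
  simpa [pvTail] using h
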